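-- pv_equiv track=rewrite | github.com/JnBrymn/roku | scripts/convert_obj_to_format.py | faces_to_edges
-- ===== SOURCE A (Python) =====
-- from typing import List, Tuple, Set
--
-- def faces_to_edges(faces: List[List[int]]) -> List[Tuple[int, int]]:
--     """
--     Convert faces to edges.
--     Each face contributes edges between consecutive vertices.
--     """
--     edges_set: Set[Tuple[int, int]] = set()
--
--     for face in faces:
--         for i in range(len(face)):
--             v1 = face[i]
--             v2 = face[(i + 1) % len(face)]
--             # Ensure edges are ordered (smaller index first)
--             edge = (min(v1, v2), max(v1, v2))
--             edges_set.add(edge)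
--
--     edges = sorted(list(edges_set))
--     return edges
-- ===== SOURCE B (Python) =====
-- from typing import List, Tuple
--
-- def faces_to_edges(faces: List[List[int]]) -> List[Tuple[int, int]]:
--     """
--     Convert faces to edges.
--     Pair each vertex with its cyclic successor by zipping the face with its
--     rotation (no index arithmetic), normalize each pair, sort everything once,
--     then strip adjacent duplicates in one final pass.
--     """
--     all_edges = sorted(
--         (a, b) if a <= b else (b, a)
--         for face in faces
--         for a, b in zip(face, face[1:] + face[:1])
--     )
--     out: List[Tuple[int, int]] = []
--     for e in all_edges:
--         if not out or out[-1] != e: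
--             out.append(e)
--     return out
-- ===== Notes on version B (the rewrite author's own statement) =====
-- stated objective: alternative
-- what changed: Edges are generated by zipping each face with its rotation (no index/modulo arithmetic) into one flat list, which is sorted once and then deduplicated by a separate adjacent-duplicate pass, instead of A's per-edge hash-set insertion followed by sorting the set.
import Mathlib
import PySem

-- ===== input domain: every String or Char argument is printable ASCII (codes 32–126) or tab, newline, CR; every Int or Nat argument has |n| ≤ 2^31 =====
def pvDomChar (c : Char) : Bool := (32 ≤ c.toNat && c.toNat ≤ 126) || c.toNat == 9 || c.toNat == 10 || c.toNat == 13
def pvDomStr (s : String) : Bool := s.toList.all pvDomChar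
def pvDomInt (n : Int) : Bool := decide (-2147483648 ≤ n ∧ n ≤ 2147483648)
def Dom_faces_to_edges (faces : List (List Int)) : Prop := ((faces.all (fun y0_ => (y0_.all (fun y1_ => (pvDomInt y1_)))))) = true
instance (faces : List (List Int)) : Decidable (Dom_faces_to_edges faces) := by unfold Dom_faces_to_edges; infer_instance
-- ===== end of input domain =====

-- B pairs each vertex with its cyclic successor by zipping the face with its rotation,
-- sorts the flat edge list once, and strips adjacent duplicates in a separate pass,
-- instead of A's indexed loop inserting into a hash set then sorting (same cost).


-- ===== PORT A =====
def faces_to_edges (faces : List (List Int)) : List (Int × Int) :=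
  let edges_set : PySem.Set (Int × Int) :=
    faces.foldl (fun es face =>
      (PySem.List.pyRange 0 (face.length : Int) 1).foldl (fun es i =>
        let v1 := PySem.List.pyGetD face i 0
        let v2 := PySem.List.pyGetD face (PySem.Int.mod (i + 1) (face.length : Int)) 0
        PySem.Set.add es (min v1 v2, max v1 v2)) es) PySem.Set.empty
  PySem.List.sorted2 edges_set (fun p => p.1) (fun p => p.2)

-- ===== PORT B =====
def faces_to_edges_alt (faces : List (List Int)) : List (Int × Int) :=
  let all_edges : List (Int × Int) :=
    PySem.List.sorted2
      (faces.flatMap (fun face =>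
        (face.zip (PySem.List.slice face (some 1) none ++ PySem.List.slice face none (some 1))).map
          (fun ab => if ab.1 ≤ ab.2 then (ab.1, ab.2) else (ab.2, ab.1))))
      (fun p => p.1) (fun p => p.2)
  all_edges.foldl (fun out e =>
    if out = [] ∨ PySem.List.pyGetD out (-1) (0, 0) ≠ e then out ++ [e] else out) []

-- ===== PRECONDITION & SPEC =====
def Spec_faces_to_edges (faces : List (List Int)) (out : List (Int × Int)) : Prop := out = faces_to_edges_alt faces
instance (faces : List (List Int)) (out : List (Int × Int)) : Decidable (Spec_faces_to_edges faces out) := by unfold Spec_faces_to_edges; infer_instance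

-- ===== CLAIM (what is proved, stated in full; the proofs are below) =====
def Claim_equal_faces_to_edges : Prop := ∀ (faces : List (List Int)), Dom_faces_to_edges faces → Spec_faces_to_edges faces (faces_to_edges faces)

-- ===== LEMMAS AND PROOFS =====

-- helper definitions for the proof (the normalized edge of face at index i, and the flat edge list)
def edgeOf (face : List Int) (i : Int) : Int × Int :=
  let v1 := PySem.List.pyGetD face i 0
  let v2 := PySem.List.pyGetD face (PySem.Int.mod (i + 1) (face.length : Int)) 0
  (min v1 v2, max v1 v2)

def faceEdges (face : List Int) : List (Int × Int) :=
  (PySem.List.pyRange 0 (face.length : Int) 1).map (edgeOf face)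

def flatEdges (faces : List (List Int)) : List (Int × Int) := faces.flatMap faceEdges

def pvKey (p : Int × Int) : Int ×ₗ Int := toLex p

theorem pvKey_injective : Function.Injective pvKey := fun _ _ h => toLex.injective h

-- the two comparators (tuple sort vs sort by the lexicographic key) agree
theorem sorted2_eq_sorted_key (xs : List (Int × Int)) :
    PySem.List.sorted2 xs (fun p => p.1) (fun p => p.2) = PySem.List.sorted xs pvKey := by
  rw [PySem.List.sorted_eq_foldl_insertBy]
  show List.foldl (fun acc x => PySem.List.insertBy
      (fun a b => decide (a.1 < b.1) || (!decide (b.1 < a.1) && decide (a.2 < b.2))) x acc) [] xs = _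
  have hcmp : (fun (a b : Int × Int) => decide (a.1 < b.1) || (!decide (b.1 < a.1) && decide (a.2 < b.2)))
      = fun a b => decide (pvKey a < pvKey b) := by
    funext a b
    apply Bool.eq_iff_iff.mpr
    simp only [pvKey, Prod.Lex.toLex_lt_toLex, Bool.or_eq_true, Bool.and_eq_true, Bool.not_eq_true',
      decide_eq_true_eq, decide_eq_false_iff_not]
    omega
  rw [hcmp]

-- A's inner loop: the set after adding a face's edges, as a foldl over the edge list
theorem innerA (face : List Int) (es : PySem.Set (Int × Int)) :
    (PySem.List.pyRange 0 (face.length : Int) 1).foldl (fun es i =>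
        let v1 := PySem.List.pyGetD face i 0
        let v2 := PySem.List.pyGetD face (PySem.Int.mod (i + 1) (face.length : Int)) 0
        PySem.Set.add es (min v1 v2, max v1 v2)) es
      = (faceEdges face).foldl PySem.Set.add es := by
  rw [faceEdges, List.foldl_map]
  rfl

-- fold of per-face folds = one fold over the flattened list
theorem foldl_foldl_flatMap {a b : Type} (E : a -> List b) (f : List b -> b -> List b) :
    forall (l : List a) (s : List b),
      l.foldl (fun s x => (E x).foldl f s) s = (l.flatMap E).foldl f s
  | [], s => rfl
  | x :: t, s => by
      rw [List.flatMap_cons, List.foldl_append]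
      exact foldl_foldl_flatMap E f t _

theorem portA_eq (faces : List (List Int)) :
    faces_to_edges faces = PySem.List.sorted (PySem.Set.ofList (flatEdges faces)) pvKey := by
  show PySem.List.sorted2 (faces.foldl _ PySem.Set.empty) (fun p : Int × Int => p.1) (fun p => p.2) = _
  rw [sorted2_eq_sorted_key]
  congr 1
  have h1 : (faces.foldl (fun es face =>
      (PySem.List.pyRange 0 (face.length : Int) 1).foldl (fun es i =>
        let v1 := PySem.List.pyGetD face i 0
        let v2 := PySem.List.pyGetD face (PySem.Int.mod (i + 1) (face.length : Int)) 0
        PySem.Set.add es (min v1 v2, max v1 v2)) es) PySem.Set.empty)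
      = faces.foldl (fun es face => (faceEdges face).foldl PySem.Set.add es) PySem.Set.empty := by
    congr 1
    funext es face
    exact innerA face es
  rw [h1, foldl_foldl_flatMap, PySem.Set.ofList_eq_foldl]
  rfl

-- B's conditional swap is the (min, max) normalization
theorem cond_eq_minmax (v1 v2 : Int) :
    (if v1 <= v2 then (v1, v2) else (v2, v1)) = (min v1 v2, max v1 v2) := by
  simp only [min_def, max_def]
  split_ifs <;> rfl

-- zip-with-rotation generates exactly the indexed edge list of a face
theorem zip_rot_eq_faceEdges (face : List Int) :
    (face.zip (PySem.List.slice face (some 1) none ++ PySem.List.slice face none (some 1))).map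
        (fun ab => if ab.1 ≤ ab.2 then (ab.1, ab.2) else (ab.2, ab.1))
      = faceEdges face := by
  rw [PySem.List.slice_from_one, PySem.List.slice_to _ (by omega : (0:Int) ≤ 1)]
  rcases face.eq_nil_or_concat with rfl | ⟨_, _, _⟩
  · rfl
  apply List.ext_getElem
  · have hn : 0 < face.length := by
      rcases face with _ | _
      · simp_all
      · simp
    simp [faceEdges, PySem.List.length_pyRange_one]
    omega
  · intro k h1 h2
    have hn : 0 < face.length := by
      rcases face with _ | _
      · simp_all
      · simp
    have hk : k < face.length := by
      simp [List.length_zip, List.length_tail] at h1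
      omega
    simp only [List.getElem_map, List.getElem_zip, faceEdges]
    rw [PySem.List.getElem_pyRange_one]
    rw [cond_eq_minmax]
    unfold edgeOf
    have hget1 : PySem.List.pyGetD face ((0:Int) + (k:Int)) 0 = face[k] := by
      rw [zero_add]
      rw [PySem.List.pyGetD_natCast]
      simp [hk, List.getD_eq_getElem?_getD]
    have hmod : PySem.Int.mod ((0:Int) + (k:Int) + 1) (face.length : Int)
        = (((k+1) % face.length : Nat) : Int) := by
      rw [zero_add]
      have : ((k:Int) + 1) = ((k+1 : Nat) : Int) := by push_cast; ring
      rw [this, PySem.Int.mod_natCast]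
    have hget2 : PySem.List.pyGetD face ((((k+1) % face.length : Nat)) : Int) 0
        = face[(k+1) % face.length]'(Nat.mod_lt _ hn) := by
      rw [PySem.List.pyGetD_natCast]
      have hlt : (k+1) % face.length < face.length := Nat.mod_lt _ hn
      simp [List.getD_eq_getElem?_getD, List.getElem?_eq_getElem hlt]
    rw [hget1, hmod, hget2]
    -- now: (min face[k] rot[k], max ...) with rot[k] = (face.tail ++ face.take 1)[k]
    congr 1
    · congr 1
      by_cases hlast : k + 1 = face.length
      · have : (k+1) % face.length = 0 := by rw [hlast]; simp
        simp only [this]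
        rw [List.getElem_append_right (by simp [List.length_tail]; omega)]
        simp [List.length_tail]
        simp only [show k - (face.length - 1) = 0 from by omega]
      · have hk1 : k + 1 < face.length := by omega
        have : (k+1) % face.length = k+1 := Nat.mod_eq_of_lt hk1
        simp only [this]
        rw [List.getElem_append_left (by simp [List.length_tail]; omega)]
        rw [List.getElem_tail]
    · congr 1
      by_cases hlast : k + 1 = face.length
      · have : (k+1) % face.length = 0 := by rw [hlast]; simp
        simp only [this]
        rw [List.getElem_append_right (by simp [List.length_tail]; omega)]
        simp [List.length_tail]
        simp only [show k - (face.length - 1) = 0 from by omega]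
      · have hk1 : k + 1 < face.length := by omega
        have : (k+1) % face.length = k+1 := Nat.mod_eq_of_lt hk1
        simp only [this]
        rw [List.getElem_append_left (by simp [List.length_tail]; omega)]
        rw [List.getElem_tail]

theorem flat_eq (faces : List (List Int)) :
    faces.flatMap (fun face =>
        (face.zip (PySem.List.slice face (some 1) none ++ PySem.List.slice face none (some 1))).map
          (fun ab => if ab.1 ≤ ab.2 then (ab.1, ab.2) else (ab.2, ab.1)))
      = flatEdges faces := by
  rw [flatEdges]
  exact List.flatMap_congr (fun face _ => zip_rot_eq_faceEdges face)

-- on a key-sorted prefix, "last element differs" is exactly "not contained"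
theorem mem_key_le_getLast (l : List (Int × Int)) (h : l ≠ [])
    (hp : l.Pairwise (fun a b => pvKey a <= pvKey b)) (a : Int × Int) (ha : a ∈ l) :
    pvKey a <= pvKey (l.getLast h) := by
  induction l with
  | nil => cases ha
  | cons x t ih =>
    cases t with
    | nil =>
      simp only [List.mem_singleton] at ha
      subst ha; exact le_refl _
    | cons y u =>
      rw [List.getLast_cons (by simp)]
      rcases List.mem_cons.mp ha with rfl | hat
      · exact (List.pairwise_cons.mp hp).1 _ (List.getLast_mem _)
      · exact ih (by simp) (List.pairwise_cons.mp hp).2 hat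

-- B's dedup loop computes Python's ordered dedup on a sorted list
theorem dedupLoop_eq_dedup (s : List (Int × Int))
    (hs : s.Pairwise (fun a b => pvKey a <= pvKey b)) :
    s.foldl (fun edges e =>
        if edges = [] ∨ PySem.List.pyGetD edges (-1) (0, 0) ≠ e then edges ++ [e] else edges) []
      = PySem.List.dedup s := by
  rw [PySem.List.dedup_eq_ofList, PySem.Set.ofList_eq_foldl]
  suffices h : ∀ (s acc : List (Int × Int)), (acc ++ s).Pairwise (fun a b => pvKey a <= pvKey b) →
      s.foldl (fun edges e =>
        if edges = [] ∨ PySem.List.pyGetD edges (-1) (0, 0) ≠ e then edges ++ [e] else edges) acc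
      = s.foldl PySem.Set.add acc by
    exact h s [] hs
  intro s
  induction s with
  | nil => intro acc _; rfl
  | cons e s' ih =>
    intro acc hp
    have hstep : (if acc = [] ∨ PySem.List.pyGetD acc (-1) (0, 0) ≠ e then acc ++ [e] else acc)
        = PySem.Set.add acc e := by
      rcases eq_or_ne acc [] with rfl | hne
      · simp [PySem.Set.add, PySem.Set.contains]
      · rw [PySem.List.pyGetD_neg_one acc (0,0) hne]
        have hmem : e ∈ acc ↔ acc.getLast hne = e := by
          constructor
          · intro he
            have h1 : pvKey e <= pvKey (acc.getLast hne) :=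
              mem_key_le_getLast acc hne (hp.sublist (List.sublist_append_left _ _)) e he
            have h2 : pvKey (acc.getLast hne) <= pvKey e := by
              have := (List.pairwise_append.mp hp).2.2
              exact this _ (List.getLast_mem hne) e (List.mem_cons_self)
            exact pvKey_injective (le_antisymm h2 h1)
          · intro hl; rw [← hl]; exact List.getLast_mem hne
        by_cases hc : acc.getLast hne = e
        · have hin : e ∈ acc := hmem.mpr hc
          simp [PySem.Set.add, PySem.Set.contains, hne, hc, hin]
        · have hout : e ∉ acc := fun he => hc (hmem.mp he)
          simp [PySem.Set.add, PySem.Set.contains, hne, hc, hout]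
    rw [List.foldl_cons, List.foldl_cons, hstep]
    apply ih
    rcases eq_or_ne (PySem.Set.add acc e) (acc ++ [e]) with h | h
    · rw [h, List.append_assoc]
      exact hp.sublist (by simp)
    · have : PySem.Set.add acc e = acc := by
        unfold PySem.Set.add; split <;> simp_all
      rw [this]
      exact hp.sublist (List.Sublist.append_left (List.sublist_cons_self _ _) _)

-- Python set(xs) (ordered first occurrences) is a sublist of xs
theorem ofList_foldl_sublist {a : Type} [BEq a] :
    forall (xs acc : List a), (xs.foldl PySem.Set.add acc).Sublist (acc ++ xs)
  | [], acc => by simp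
  | x :: t, acc => by
      rw [List.foldl_cons]
      refine (ofList_foldl_sublist t _).trans ?_
      unfold PySem.Set.add
      split
      · exact List.Sublist.append_left (List.sublist_cons_self _ _) _
      · rw [List.append_assoc]
        exact List.Sublist.refl _

theorem ofList_sublist {a : Type} [BEq a] (xs : List a) :
    (PySem.Set.ofList xs).Sublist xs := by
  rw [PySem.Set.ofList_eq_foldl]
  simpa using ofList_foldl_sublist xs []

-- the crux: dedup-after-sort equals sort-after-dedup
theorem dedup_sorted_eq (L : List (Int × Int)) :
    PySem.List.dedup (PySem.List.sorted L pvKey)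
      = PySem.List.sorted (PySem.Set.ofList L) pvKey := by
  symm
  apply PySem.List.sorted_eq_of_perm_of_pairwise_lt
  · rw [PySem.List.dedup_eq_ofList]
    apply (List.perm_ext_iff_of_nodup (PySem.Set.nodup_ofList _) (PySem.Set.nodup_ofList _)).mpr
    intro x
    rw [PySem.Set.mem_ofList, PySem.Set.mem_ofList, PySem.List.mem_sorted]
  · have hsub : (PySem.List.dedup (PySem.List.sorted L pvKey)).Sublist
        (PySem.List.sorted L pvKey) := by
      rw [PySem.List.dedup_eq_ofList]; exact ofList_sublist _
    have hle := (PySem.List.sorted_pairwise L pvKey).sublist hsub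
    have hnd : (PySem.List.dedup (PySem.List.sorted L pvKey)).Pairwise (· ≠ ·) := by
      rw [PySem.List.dedup_eq_ofList]; exact PySem.Set.nodup_ofList _
    exact (hle.and hnd).imp fun ⟨h1, h2⟩ =>
      lt_of_le_of_ne h1 (fun hk => h2 (pvKey_injective hk))

theorem faces_to_edges_main (faces : List (List Int)) :
    faces_to_edges faces = faces_to_edges_alt faces := by
  rw [portA_eq]
  show _ = (PySem.List.sorted2 (faces.flatMap _) (fun p : Int × Int => p.1) (fun p => p.2)).foldl
    (fun out e => if out = [] ∨ PySem.List.pyGetD out (-1) ((0 : Int), (0 : Int)) ≠ e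
      then out ++ [e] else out) []
  rw [flat_eq, sorted2_eq_sorted_key,
    dedupLoop_eq_dedup _ (PySem.List.sorted_pairwise _ _),
    dedup_sorted_eq]

-- ===== VERDICT (by name: the statement is the Claim_ definition above) =====
theorem faces_to_edges_spec : Claim_equal_faces_to_edges := by
  intro faces _
  exact faces_to_edges_main faces
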